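-- pv_equiv track=rewrite | github.com/miliar/Code_Jam_Webscraper | Solutions_python/Problem_201/424.py | dc
-- ===== SOURCE A (Python) =====
-- def dc(x, y):
-- 	if y==1:
-- 		if x%2==0:
-- 			return x//2,(x-1)//2
-- 		else:
-- 			return x//2,x//2
-- 	if y%2:
-- 		x = (x-1)//2
-- 	else:
-- 		x //= 2
-- 	y //= 2
-- 	return dc(x,y)
-- ===== SOURCE B (Python) =====
-- def dc(x, y):
--     while y != 1:
--         if y % 2:
--             x = (x - 1) // 2
--         else:
--             x //= 2
--         y //= 2
--     if x % 2 == 0: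
--         return x // 2, (x - 1) // 2
--     else:
--         return x // 2, x // 2
-- ===== Notes on version B (the rewrite author's own statement) =====
-- stated objective: alternative
-- what changed: Replaced A's tail recursion by an explicit while loop that reduces (x, y) until y == 1 and then applies the base-case parity branch once, outside the loop.
-- outside the precondition, e.g. on dc(5, 0): A raises RecursionError, B does not finish within the time limit
import Mathlib
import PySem

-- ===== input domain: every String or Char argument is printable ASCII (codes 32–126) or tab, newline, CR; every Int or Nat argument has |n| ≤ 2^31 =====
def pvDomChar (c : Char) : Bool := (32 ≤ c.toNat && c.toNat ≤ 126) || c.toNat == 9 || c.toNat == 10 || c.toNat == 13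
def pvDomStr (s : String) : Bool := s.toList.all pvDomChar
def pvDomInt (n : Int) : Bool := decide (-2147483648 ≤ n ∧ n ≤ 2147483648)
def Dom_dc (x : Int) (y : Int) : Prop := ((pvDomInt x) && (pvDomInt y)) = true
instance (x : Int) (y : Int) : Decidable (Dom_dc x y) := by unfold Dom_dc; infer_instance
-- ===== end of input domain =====

-- B replaces A's tail recursion by an explicit while loop plus a single base-case branch after the loop (alternative decomposition, same cost); Pre_ excludes y < 1, where A recurses forever (RecursionError) and B loops forever.


-- ===== PORT A =====
-- fuel makes the recursion total; for y ≥ 1 (Pre_) the fuel y.toNat + 1 is never exhausted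
def dcA : Nat → Int → Int → Int × Int
  | 0, _, _ => (0, 0)
  | n + 1, x, y =>
    if y = 1 then
      if PySem.Int.mod x 2 = 0 then (PySem.Int.floordiv x 2, PySem.Int.floordiv (x - 1) 2)
      else (PySem.Int.floordiv x 2, PySem.Int.floordiv x 2)
    else
      let x' := if PySem.Int.mod y 2 ≠ 0 then PySem.Int.floordiv (x - 1) 2 else PySem.Int.floordiv x 2
      dcA n x' (PySem.Int.floordiv y 2)

def dc (x : Int) (y : Int) : Int × Int := dcA (y.toNat + 1) x y

-- ===== PORT B =====
-- the while loop: returns the final (x, y) state when y reaches 1 (fuel for totality)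
def dcLoop : Nat → Int → Int → Int × Int
  | 0, x, y => (x, y)
  | n + 1, x, y =>
    if y ≠ 1 then
      let x' := if PySem.Int.mod y 2 ≠ 0 then PySem.Int.floordiv (x - 1) 2 else PySem.Int.floordiv x 2
      dcLoop n x' (PySem.Int.floordiv y 2)
    else (x, y)

def dc_alt (x : Int) (y : Int) : Int × Int :=
  let x' := (dcLoop (y.toNat + 1) x y).1
  if PySem.Int.mod x' 2 = 0 then (PySem.Int.floordiv x' 2, PySem.Int.floordiv (x' - 1) 2)
  else (PySem.Int.floordiv x' 2, PySem.Int.floordiv x' 2)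

-- ===== PRECONDITION & SPEC =====
-- Pre_ excludes y < 1: there Python A never reaches its base case (RecursionError), returning no value.
def Pre_dc (x : Int) (y : Int) : Prop := 1 ≤ y
instance (x : Int) (y : Int) : Decidable (Pre_dc x y) := by unfold Pre_dc; infer_instance
def pvWitness_dc : Int × Int := (5, 3)

def Spec_dc (x : Int) (y : Int) (out : Int × Int) : Prop := out = dc_alt x y
instance (x : Int) (y : Int) (out : Int × Int) : Decidable (Spec_dc x y out) := by unfold Spec_dc; infer_instance

-- ===== CLAIM (what is proved, stated in full; the proofs are below) =====
def Claim_equal_dc : Prop := ∀ (x : Int) (y : Int), Dom_dc x y → Pre_dc x y → Spec_dc x y (dc x y)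

-- ===== LEMMAS AND PROOFS =====
def dcBase (x : Int) : Int × Int :=
  if PySem.Int.mod x 2 = 0 then (PySem.Int.floordiv x 2, PySem.Int.floordiv (x - 1) 2)
  else (PySem.Int.floordiv x 2, PySem.Int.floordiv x 2)

theorem dcA_eq_loop : ∀ (n : Nat) (x y : Int), 1 ≤ y → y.toNat < n →
    dcA n x y = dcBase (dcLoop n x y).1 := by
  intro n
  induction n with
  | zero => intro x y hy hn; omega
  | succ n ih =>
    intro x y hy hn
    by_cases h1 : y = 1
    · simp [dcA, dcLoop, dcBase, h1]
    · have hy2 : 2 ≤ y := by omega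
      have hfd : PySem.Int.floordiv y 2 = y / 2 :=
        PySem.Int.floordiv_eq_ediv_of_pos (by omega)
      have hrec : 1 ≤ PySem.Int.floordiv y 2 := by rw [hfd]; omega
      have hlt : (PySem.Int.floordiv y 2).toNat < n := by rw [hfd]; omega
      simp only [dcA, dcLoop, if_neg h1, if_pos h1]
      split <;> exact ih _ _ hrec hlt

-- ===== VERDICT (by name: the statement is the Claim_ definition above) =====
theorem dc_spec : Claim_equal_dc := by
  intro x y _ hy
  unfold Spec_dc dc dc_alt
  rw [dcA_eq_loop (y.toNat + 1) x y hy (by omega)]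
  rfl
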